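-- pv_equiv track=rewrite | github.com/mattyws/tcc_deep | DumpScript/TrainingLevelDoc2VecDeepBase5.py | separate_class
-- ===== SOURCE A (Python) =====
-- def separate_class(keys, level):
--     data = []
--     for key in keys:
--         key_subclasses = dict()
--         for lKey in level.keys():
--             if lKey.startswith(key):
--                 key_subclasses[lKey] = level[lKey]
--         data.append(key_subclasses)
--     return data
-- ===== SOURCE B (Python) =====
-- def separate_class(keys, level):
--     # index the prefix keys once, then enumerate each level key's prefixes and
--     # look them up, instead of scanning every key for every level key
--     by_key = {}
--     for i, key in enumerate(keys):
--         by_key.setdefault(key, []).append(i)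
--     buckets = [dict() for _ in keys]
--     for lKey, v in level.items():
--         for j in range(len(lKey) + 1):
--             for i in by_key.get(lKey[:j], ()):
--                 buckets[i][lKey] = v
--     return buckets
-- ===== Notes on version B (the rewrite author's own statement) =====
-- stated objective: faster
-- what changed: B builds a hash index from key string to key positions once, then for each level entry enumerates its prefixes and looks each up in the index, so the per-entry scan over all keys disappears.
import Mathlib
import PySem

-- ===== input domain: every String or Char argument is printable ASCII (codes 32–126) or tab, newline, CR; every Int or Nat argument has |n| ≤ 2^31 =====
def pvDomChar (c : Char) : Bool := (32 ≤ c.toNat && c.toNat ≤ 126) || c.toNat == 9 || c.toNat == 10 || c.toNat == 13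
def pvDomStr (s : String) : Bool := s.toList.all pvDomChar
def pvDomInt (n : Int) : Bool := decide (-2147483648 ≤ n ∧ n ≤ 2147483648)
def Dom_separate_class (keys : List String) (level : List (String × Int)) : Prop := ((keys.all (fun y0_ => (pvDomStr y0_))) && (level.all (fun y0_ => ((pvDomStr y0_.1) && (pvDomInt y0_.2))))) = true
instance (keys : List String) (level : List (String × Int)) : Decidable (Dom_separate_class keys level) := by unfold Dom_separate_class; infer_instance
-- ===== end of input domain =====

-- B indexes the key list by key string once and enumerates each level key's prefixes for lookup,
-- removing A's scan over every key for every level key.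

-- ===== PORT A =====
-- A: for each key, scan all dict keys, copying prefix-matching entries into a fresh dict.
-- level[lKey] is ported as getD _ 0: lKey always comes from the dict's own keys, so the default is never used.
def separate_class (keys : List String) (level : List (String × Int)) : List (List (String × Int)) :=
  let d := PySem.Dict.ofList level
  (keys.foldl (fun data key =>
    data ++ [d.keys.foldl (fun ks lKey =>
        if PySem.Str.startswith lKey key then ks.insert lKey (d.getD lKey 0) else ks)
      PySem.Dict.empty]) []).map PySem.Dict.items

-- ===== PORT B =====
-- B: build by_key (key string -> list of key positions) once; for each level entry enumerate the
-- prefixes lKey[:j] and dispatch the entry into the buckets of the positions found at each prefix.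
-- buckets[i] read/write is ported with pyGetD/pySetD; the index i comes from enumerate, always in range.
def separate_class_alt (keys : List String) (level : List (String × Int)) : List (List (String × Int)) :=
  let by_key : PySem.Dict String (List Int) :=
    (PySem.List.enumerate keys).foldl (fun d q => d.modify q.2 [] (fun l => l ++ [q.1])) PySem.Dict.empty
  let d := PySem.Dict.ofList level
  let buckets : List (PySem.Dict String Int) := keys.map (fun _ => PySem.Dict.empty)
  (d.items.foldl (fun bs p =>
      (PySem.List.pyRange 0 (PySem.Str.len p.1 + 1) 1).foldl (fun bs j =>
        (by_key.getD (PySem.Str.slice p.1 (some 0) (some j)) []).foldl (fun bs i =>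
          PySem.List.pySetD bs i ((PySem.List.pyGetD bs i PySem.Dict.empty).insert p.1 p.2)) bs) bs)
    buckets).map PySem.Dict.items

-- ===== PRECONDITION & SPEC =====
def Spec_separate_class (keys : List String) (level : List (String × Int)) (out : List (List (String × Int))) : Prop := out = separate_class_alt keys level
instance (keys : List String) (level : List (String × Int)) (out : List (List (String × Int))) : Decidable (Spec_separate_class keys level out) := by unfold Spec_separate_class; infer_instance

-- ===== CLAIM (what is proved, stated in full; the proofs are below) =====
def Claim_equal_separate_class : Prop := ∀ (keys : List String) (level : List (String × Int)), Dom_separate_class keys level → Spec_separate_class keys level (separate_class keys level)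

-- ===== LEMMAS AND PROOFS =====

-- proof-side abbreviations for B's intermediate structures (definitionally the let-bodies of the port)
def bkey (keys : List String) : PySem.Dict String (List Int) :=
  (PySem.List.enumerate keys).foldl (fun d q => d.modify q.2 [] (fun l => l ++ [q.1])) PySem.Dict.empty

def hits (keys : List String) (lk : String) : List Int :=
  ((PySem.List.pyRange 0 (PySem.Str.len lk + 1) 1).map
    (fun j => (bkey keys).getD (PySem.Str.slice lk (some 0) (some j)) [])).flatten

-- A's inner loop: copying prefix-matching keys into a fresh dict filters the items list.
theorem aBucket_eq_filter (d : PySem.Dict String Int) (hnd : d.keys.Nodup) (key : String) :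
    (d.keys.foldl (fun ks lKey =>
        if PySem.Str.startswith lKey key then ks.insert lKey (d.getD lKey 0) else ks)
      PySem.Dict.empty).items
      = d.items.filter (fun p => PySem.Str.startswith p.1 key) := by
  rw [PySem.List.foldl_if_eq_foldl_filter]
  rw [PySem.Dict.items_foldl_insert_fresh (d.keys.filter (fun k => PySem.Str.startswith k key))
      (fun k => k) (fun k => d.getD k 0) PySem.Dict.empty
      (fun a _ => PySem.Dict.contains_empty _)
      (by simpa using hnd.filter _)]
  rw [PySem.Dict.items_eq_map_keys d hnd 0]
  simp only [List.filter_map, PySem.Dict.empty, PySem.Str.startswith_eq]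
  rfl

-- dict built by inserting distinct fresh keys gives back exactly the pair list.
theorem ofList_items_of_nodup (b : List (String × Int)) (h : (b.map Prod.fst).Nodup) :
    (b.foldl (fun acc p => acc.insert p.1 p.2) PySem.Dict.empty).items = b := by
  rw [PySem.Dict.items_foldl_insert_fresh b Prod.fst Prod.snd PySem.Dict.empty
      (fun a _ => PySem.Dict.contains_empty _) h]
  simp [PySem.Dict.empty]

-- by_key's lookup lists the positions (in order) whose key equals the looked-up string.
theorem getD_bkey (keys : List String) (k : String) :
    (bkey keys).getD k []
      = ((PySem.List.enumerate keys).filter (fun q => q.2 == k)).map (fun q => q.1) := by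
  unfold bkey
  rw [show (List.foldl (fun d q => d.modify q.2 [] (fun l => l ++ [q.1])) PySem.Dict.empty
        (PySem.List.enumerate keys))
      = (List.foldl (fun d p => d.modify p.1 [] (fun l => l ++ [p.2])) PySem.Dict.empty
          ((PySem.List.enumerate keys).map (fun q => (q.2, q.1)))) from by rw [List.foldl_map],
    PySem.Dict.getD_foldl_modify_append, List.filter_map, List.map_map]
  rw [PySem.Dict.getD_empty, List.nil_append]
  rfl

theorem mem_bkey (keys : List String) (k : String) (i : Int) :
    i ∈ (bkey keys).getD k [] ↔ ∃ (n : Nat) (_ : n < keys.length), i = (n : Int) ∧ keys[n] = k := by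
  rw [getD_bkey]
  simp only [List.mem_map, List.mem_filter, PySem.List.mem_enumerate_iff]
  constructor
  · rintro ⟨q, ⟨⟨n, hn, rfl⟩, hq⟩, rfl⟩
    exact ⟨n, hn, by simp, by simpa using hq⟩
  · rintro ⟨n, hn, rfl, rfl⟩
    exact ⟨((0 : Int) + n, keys[n]), ⟨⟨n, hn, rfl⟩, by simp⟩, by simp⟩

-- a string starts with k iff k is one of its slices lk[:j]
theorem startswith_iff_slice (lk k : String) :
    PySem.Str.startswith lk k = true
      ↔ ∃ j : Int, 0 ≤ j ∧ j < PySem.Str.len lk + 1 ∧ k = PySem.Str.slice lk (some 0) (some j) := by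
  rw [PySem.Str.startswith_eq, PySem.Chars.startswith_iff]
  constructor
  · intro h
    refine ⟨(k.toList.length : Int), Int.natCast_nonneg _, ?_, ?_⟩
    · have := h.length_le
      rw [PySem.Str.len_eq]
      omega
    · apply String.toList_inj.mp
      rw [PySem.Str.toList_slice]
      simp only [PySem.Chars.slice_eq_listSlice]
      rw [PySem.List.slice_zero_start, PySem.List.slice_to_natCast]
      exact List.prefix_iff_eq_take.mp h
  · rintro ⟨j, hj0, _, rfl⟩
    rw [PySem.Str.toList_slice]
    simp only [PySem.Chars.slice_eq_listSlice]
    rw [PySem.List.slice_zero_start, PySem.List.slice_to _ hj0]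
    exact List.take_prefix _ _

theorem mem_hits (keys : List String) (lk : String) (i : Int) :
    i ∈ hits keys lk
      ↔ ∃ (n : Nat) (_ : n < keys.length), i = (n : Int) ∧ PySem.Str.startswith lk keys[n] = true := by
  unfold hits
  simp only [List.mem_flatten, List.mem_map]
  constructor
  · rintro ⟨L, ⟨j, hj, rfl⟩, hi⟩
    rw [PySem.List.mem_pyRange_one] at hj
    obtain ⟨n, hn, rfl, hk⟩ := (mem_bkey _ _ _).mp hi
    exact ⟨n, hn, rfl, (startswith_iff_slice lk keys[n]).mpr ⟨j, hj.1, hj.2, hk⟩⟩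
  · rintro ⟨n, hn, rfl, hs⟩
    obtain ⟨j, hj0, hjlt, hk⟩ := (startswith_iff_slice lk keys[n]).mp hs
    refine ⟨_, ⟨j, ?_, rfl⟩, (mem_bkey _ _ _).mpr ⟨n, hn, rfl, hk⟩⟩
    rw [PySem.List.mem_pyRange_one]
    exact ⟨hj0, hjlt⟩

-- scatter loop: folding pySetD-insert over an in-range index list updates exactly the hit positions
theorem foldl_pySetD_insert (I : List Int) (bs : List (PySem.Dict String Int)) (k : String) (v : Int)
    (hmem : ∀ i ∈ I, 0 ≤ i ∧ i.toNat < bs.length) :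
    (I.foldl (fun bs i => PySem.List.pySetD bs i ((PySem.List.pyGetD bs i PySem.Dict.empty).insert k v)) bs).length = bs.length
    ∧ ∀ n : Nat, PySem.List.pyGetD
        (I.foldl (fun bs i => PySem.List.pySetD bs i ((PySem.List.pyGetD bs i PySem.Dict.empty).insert k v)) bs)
        (n : Int) PySem.Dict.empty
      = if (n : Int) ∈ I then (PySem.List.pyGetD bs (n : Int) PySem.Dict.empty).insert k v
        else PySem.List.pyGetD bs (n : Int) PySem.Dict.empty := by
  induction I generalizing bs with
  | nil => exact ⟨rfl, fun n => by simp⟩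
  | cons i t ih =>
    have hi0 := (hmem i (by simp)).1
    have hilt := (hmem i (by simp)).2
    have hi : i = ((i.toNat : Nat) : Int) := (Int.toNat_of_nonneg hi0).symm
    have hlen' : (PySem.List.pySetD bs i ((PySem.List.pyGetD bs i PySem.Dict.empty).insert k v)).length
        = bs.length := PySem.List.length_pySetD _ _ _
    have hmem' : ∀ x ∈ t, 0 ≤ x ∧
        x.toNat < (PySem.List.pySetD bs i ((PySem.List.pyGetD bs i PySem.Dict.empty).insert k v)).length := by
      intro x hx
      rw [hlen']
      exact hmem x (by simp [hx])
    obtain ⟨ihl, ihg⟩ := ih _ hmem'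
    simp only [List.foldl_cons]
    refine ⟨ihl.trans hlen', fun n => ?_⟩
    rw [ihg n, hi]
    rw [PySem.List.pyGetD_pySetD_natCast bs i.toNat n _ _ hilt]
    rcases eq_or_ne n i.toNat with h1 | h1
    · have hcast : ((i.toNat : Nat) : Int) = (n : Int) := by omega
      rw [hcast, if_pos h1]
      simp only [List.mem_cons, true_or, if_true]
      by_cases h2 : (n : Int) ∈ t
      · rw [if_pos h2, PySem.Dict.insert_insert_self]
      · rw [if_neg h2]
    · have hcast : ¬ ((n : Int) = ((i.toNat : Nat) : Int)) := by omega
      rw [if_neg h1]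
      simp only [List.mem_cons]
      by_cases h2 : (n : Int) ∈ t
      · rw [if_pos h2, if_pos (Or.inr h2)]
      · rw [if_neg h2, if_neg (by tauto)]

-- one level entry: the prefix-enumeration double loop is the scatter over `hits`
theorem step_eq_hits (keys : List String) (bs : List (PySem.Dict String Int)) (p : String × Int) :
    (PySem.List.pyRange 0 (PySem.Str.len p.1 + 1) 1).foldl (fun bs j =>
        ((bkey keys).getD (PySem.Str.slice p.1 (some 0) (some j)) []).foldl (fun bs i =>
          PySem.List.pySetD bs i ((PySem.List.pyGetD bs i PySem.Dict.empty).insert p.1 p.2)) bs) bs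
      = (hits keys p.1).foldl (fun bs i =>
          PySem.List.pySetD bs i ((PySem.List.pyGetD bs i PySem.Dict.empty).insert p.1 p.2)) bs := by
  unfold hits
  rw [List.foldl_flatten, List.foldl_map]

-- B's main loop invariant: bucket n accumulates exactly the level entries whose key starts with keys[n]
theorem outer_fold (keys : List String) (l : List (String × Int)) (bs : List (PySem.Dict String Int))
    (hlen : bs.length = keys.length) :
    (l.foldl (fun bs p =>
        (PySem.List.pyRange 0 (PySem.Str.len p.1 + 1) 1).foldl (fun bs j =>
          ((bkey keys).getD (PySem.Str.slice p.1 (some 0) (some j)) []).foldl (fun bs i =>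
            PySem.List.pySetD bs i ((PySem.List.pyGetD bs i PySem.Dict.empty).insert p.1 p.2)) bs) bs)
      bs).length = keys.length
    ∧ ∀ (n : Nat) (_ : n < keys.length), PySem.List.pyGetD
        (l.foldl (fun bs p =>
          (PySem.List.pyRange 0 (PySem.Str.len p.1 + 1) 1).foldl (fun bs j =>
            ((bkey keys).getD (PySem.Str.slice p.1 (some 0) (some j)) []).foldl (fun bs i =>
              PySem.List.pySetD bs i ((PySem.List.pyGetD bs i PySem.Dict.empty).insert p.1 p.2)) bs) bs)
          bs) (n : Int) PySem.Dict.empty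
      = (l.filter (fun p => PySem.Str.startswith p.1 keys[n])).foldl (fun b p => b.insert p.1 p.2)
          (PySem.List.pyGetD bs (n : Int) PySem.Dict.empty) := by
  induction l generalizing bs with
  | nil => exact ⟨hlen, fun n _ => by simp⟩
  | cons p t ih =>
    simp only [List.foldl_cons]
    rw [step_eq_hits keys bs p]
    have hmemI : ∀ i ∈ hits keys p.1, 0 ≤ i ∧ i.toNat < bs.length := by
      intro i hi
      obtain ⟨m, hm, rfl, _⟩ := (mem_hits keys p.1 i).mp hi
      refine ⟨Int.natCast_nonneg _, ?_⟩
      rw [hlen]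
      simpa using hm
    obtain ⟨hl1, hg1⟩ := foldl_pySetD_insert (hits keys p.1) bs p.1 p.2 hmemI
    obtain ⟨ihl, ihg⟩ := ih _ (hl1.trans hlen)
    refine ⟨ihl, fun n hn => ?_⟩
    rw [ihg n hn, hg1 n, List.filter_cons]
    have hmem_iff : ((n : Int) ∈ hits keys p.1) ↔ PySem.Str.startswith p.1 keys[n] = true := by
      rw [mem_hits]
      constructor
      · rintro ⟨m, hm, hnm, hs⟩
        obtain rfl : m = n := by omega
        exact hs
      · intro hs
        exact ⟨n, hn, rfl, hs⟩
    by_cases hs : PySem.Str.startswith p.1 keys[n] = true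
    · rw [if_pos (hmem_iff.mpr hs), if_pos hs, List.foldl_cons]
    · rw [if_neg (fun hin => hs (hmem_iff.mp hin)), if_neg hs]

-- ===== VERDICT (by name: the statement is the Claim_ definition above) =====
theorem separate_class_spec : Claim_equal_separate_class := by
  intro keys level _
  unfold Spec_separate_class separate_class separate_class_alt
  dsimp only
  rw [PySem.List.foldl_append_singleton_eq_map, List.nil_append, List.map_map,
    show (PySem.List.enumerate keys).foldl (fun d q => d.modify q.2 [] (fun l => l ++ [q.1]))
        PySem.Dict.empty = bkey keys from rfl]
  obtain ⟨hL, hG⟩ := outer_fold keys (PySem.Dict.ofList level).items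
    (keys.map fun _ => PySem.Dict.empty) (by simp)
  have hnd : (PySem.Dict.ofList level).keys.Nodup := PySem.Dict.nodup_keys_ofList level
  apply List.ext_getElem
  · rw [List.length_map, List.length_map, hL]
  · intro n h1 h2
    have hn : n < keys.length := by simpa using h1
    simp only [List.getElem_map, Function.comp_apply]
    rw [aBucket_eq_filter _ hnd]
    have hn' : n < ((PySem.Dict.ofList level).items.foldl (fun bs p =>
        (PySem.List.pyRange 0 (PySem.Str.len p.1 + 1) 1).foldl (fun bs j =>
          ((bkey keys).getD (PySem.Str.slice p.1 (some 0) (some j)) []).foldl (fun bs i =>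
            PySem.List.pySetD bs i ((PySem.List.pyGetD bs i PySem.Dict.empty).insert p.1 p.2)) bs) bs)
        (keys.map fun _ => PySem.Dict.empty)).length := by
      rw [hL]
      exact hn
    have hBn : ((PySem.Dict.ofList level).items.foldl (fun bs p =>
        (PySem.List.pyRange 0 (PySem.Str.len p.1 + 1) 1).foldl (fun bs j =>
          ((bkey keys).getD (PySem.Str.slice p.1 (some 0) (some j)) []).foldl (fun bs i =>
            PySem.List.pySetD bs i ((PySem.List.pyGetD bs i PySem.Dict.empty).insert p.1 p.2)) bs) bs)
        (keys.map fun _ => PySem.Dict.empty))[n]'hn'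
        = PySem.List.pyGetD ((PySem.Dict.ofList level).items.foldl (fun bs p =>
        (PySem.List.pyRange 0 (PySem.Str.len p.1 + 1) 1).foldl (fun bs j =>
          ((bkey keys).getD (PySem.Str.slice p.1 (some 0) (some j)) []).foldl (fun bs i =>
            PySem.List.pySetD bs i ((PySem.List.pyGetD bs i PySem.Dict.empty).insert p.1 p.2)) bs) bs)
        (keys.map fun _ => PySem.Dict.empty)) (n : Int) PySem.Dict.empty := by
      rw [PySem.List.pyGetD_eq_getElem _ _ (Int.natCast_nonneg _) (by exact_mod_cast hn')]
      congr 1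
    have hinit : PySem.List.pyGetD (keys.map fun _ => PySem.Dict.empty) (n : Int)
        (PySem.Dict.empty : PySem.Dict String Int) = PySem.Dict.empty := by
      rw [PySem.List.pyGetD_eq_getElem _ _ (Int.natCast_nonneg _) (by simpa using hn)]
      simp
    have hnodup : (((PySem.Dict.ofList level).items.filter
        (fun p => PySem.Str.startswith p.1 keys[n])).map Prod.fst).Nodup := by
      have h0 : ((PySem.Dict.ofList level).items.map Prod.fst).Nodup := by
        simpa [PySem.Dict.keys] using hnd
      exact h0.sublist (List.Sublist.map Prod.fst List.filter_sublist)
    have hfin : (((PySem.Dict.ofList level).items.foldl (fun bs p =>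
        (PySem.List.pyRange 0 (PySem.Str.len p.1 + 1) 1).foldl (fun bs j =>
          ((bkey keys).getD (PySem.Str.slice p.1 (some 0) (some j)) []).foldl (fun bs i =>
            PySem.List.pySetD bs i ((PySem.List.pyGetD bs i PySem.Dict.empty).insert p.1 p.2)) bs) bs)
        (keys.map fun _ => PySem.Dict.empty))[n]'hn').items
        = (PySem.Dict.ofList level).items.filter (fun p => PySem.Str.startswith p.1 keys[n]) := by
      rw [hBn, hG n hn, hinit]
      exact ofList_items_of_nodup _ hnodup
    exact hfin.symm
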